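-- pv_equiv track=rewrite | github.com/jiroshimaya/fictional-scientists | create_scientists_csv.py | infer_nationality_from_categories
-- ===== SOURCE A (Python) =====
-- def infer_nationality_from_categories(
--     category_titles: list[str],
--     nationality_to_region: dict[str, str],
-- ) -> str:
--     """カテゴリ名から nationality を推定する。"""
--     for nationality in sorted(nationality_to_region, key=len, reverse=True):
--         if any(nationality in category_title for category_title in category_titles):
--             return nationality
--     return ""
-- ===== SOURCE B (Python) =====
-- def infer_nationality_from_categories(
--     category_titles: list[str],
--     nationality_to_region: dict[str, str],
-- ) -> str:
--     """Single pass over the dict keys keeping the longest matching nationality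
--     seen so far (first occurrence wins on equal length) -- no sorting."""
--     best = ""
--     for nationality in nationality_to_region:
--         if len(nationality) > len(best) and any(
--             nationality in category_title for category_title in category_titles
--         ):
--             best = nationality
--     return best
-- ===== Notes on version B (the rewrite author's own statement) =====
-- stated objective: alternative
-- what changed: Replaces sort-by-length-descending plus first-match scan with a single unsorted pass that keeps a running longest matching nationality (strict > keeps the first key on ties, matching the stable sort's tie-break).
import Mathlib
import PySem

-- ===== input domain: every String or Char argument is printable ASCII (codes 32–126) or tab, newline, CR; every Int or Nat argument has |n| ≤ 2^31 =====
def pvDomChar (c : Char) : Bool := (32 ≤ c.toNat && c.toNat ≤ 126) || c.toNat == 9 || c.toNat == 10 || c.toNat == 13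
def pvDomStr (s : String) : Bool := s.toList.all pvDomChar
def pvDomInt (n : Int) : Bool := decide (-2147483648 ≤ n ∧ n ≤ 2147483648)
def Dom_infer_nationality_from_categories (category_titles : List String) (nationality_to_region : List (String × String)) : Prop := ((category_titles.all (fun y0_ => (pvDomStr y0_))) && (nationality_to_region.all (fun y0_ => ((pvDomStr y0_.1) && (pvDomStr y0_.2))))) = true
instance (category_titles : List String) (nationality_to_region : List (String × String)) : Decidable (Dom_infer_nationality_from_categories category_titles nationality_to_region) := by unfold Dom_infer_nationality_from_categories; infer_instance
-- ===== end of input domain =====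

-- B replaces A's sort-by-length-descending + first-match scan with one unsorted
-- running-longest-match pass; same return value, no sorting (objective: alternative).

-- ===== PORT A =====
-- the for-loop with early return: first element of the sorted key list that occurs in some title
def pvGoA (category_titles : List String) : List String → String
  | [] => ""
  | n :: rest =>
    if category_titles.any (fun t => PySem.Str.isIn n t) then n
    else pvGoA category_titles rest

def infer_nationality_from_categories (category_titles : List String) (nationality_to_region : List (String × String)) : String :=
  -- iterating the dict yields its distinct keys in insertion order: dedup of the firsts
  pvGoA category_titles
    (PySem.List.sorted (PySem.List.dedup (nationality_to_region.map Prod.fst))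
      (fun s => PySem.Str.len s) true)

-- ===== PORT B =====
def pvStepB (category_titles : List String) (best n : String) : String :=
  if PySem.Str.len best < PySem.Str.len n
      && category_titles.any (fun t => PySem.Str.isIn n t) then n
  else best

def infer_nationality_from_categories_alt (category_titles : List String) (nationality_to_region : List (String × String)) : String :=
  (PySem.List.dedup (nationality_to_region.map Prod.fst)).foldl
    (pvStepB category_titles) ""

-- ===== PRECONDITION & SPEC =====
def Spec_infer_nationality_from_categories (category_titles : List String) (nationality_to_region : List (String × String)) (out : String) : Prop := out = infer_nationality_from_categories_alt category_titles nationality_to_region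
instance (category_titles : List String) (nationality_to_region : List (String × String)) (out : String) : Decidable (Spec_infer_nationality_from_categories category_titles nationality_to_region out) := by unfold Spec_infer_nationality_from_categories; infer_instance

-- ===== CLAIM (what is proved, stated in full; the proofs are below) =====
def Claim_equal_infer_nationality_from_categories : Prop := ∀ (category_titles : List String) (nationality_to_region : List (String × String)), Dom_infer_nationality_from_categories category_titles nationality_to_region → Spec_infer_nationality_from_categories category_titles nationality_to_region (infer_nationality_from_categories category_titles nationality_to_region)

-- ===== LEMMAS AND PROOFS =====

-- length of a string is nonnegative
theorem pvLen_nonneg (x : String) : 0 ≤ PySem.Str.len x := by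
  simp [PySem.Str.len]

-- a string of length ≤ 0 is empty
theorem pvEmpty_of_len_le (x : String) (h : PySem.Str.len x ≤ 0) : x = "" := by
  simpa [PySem.Str.len] using h

-- A's scan returns "" or a member of the scanned list
theorem pvGoA_eq_empty_or_mem (titles : List String) (s : List String) :
    pvGoA titles s = "" ∨ pvGoA titles s ∈ s := by
  induction s with
  | nil => exact Or.inl rfl
  | cons y ys ih =>
    simp only [pvGoA]
    split_ifs with h
    · exact Or.inr List.mem_cons_self
    · rcases ih with h' | h'
      · exact Or.inl h'
      · exact Or.inr (List.mem_cons_of_mem _ h')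

-- prepending an element longer than everything the scan can return = B's accumulator step
theorem pvCons_step (titles : List String) (x : String) (s : List String)
    (hlt : (titles.any fun t => PySem.Str.isIn x t) = true →
      PySem.Str.len (pvGoA titles s) < PySem.Str.len x) :
    pvGoA titles (x :: s) = pvStepB titles (pvGoA titles s) x := by
  simp only [pvGoA, pvStepB]
  by_cases hp : (titles.any fun t => PySem.Str.isIn x t) = true
  · rw [if_pos hp, if_pos (by rw [Bool.and_eq_true]; exact ⟨decide_eq_true (hlt hp), hp⟩)]
  · rw [if_neg hp, if_neg (by rw [Bool.and_eq_true]; rintro ⟨-, hpx⟩; exact hp hpx)]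

-- inserting x (which goes after all elements of length ≥ len x) keeps the list length-descending
theorem pvInsert_pairwise (x : String) (s : List String)
    (hs : s.Pairwise (fun a b => PySem.Str.len b ≤ PySem.Str.len a)) :
    (PySem.List.insertBy (fun a b => decide (PySem.Str.len b < PySem.Str.len a)) x s).Pairwise
      (fun a b => PySem.Str.len b ≤ PySem.Str.len a) := by
  induction s with
  | nil => simp [PySem.List.insertBy]
  | cons y ys ih =>
    rcases List.pairwise_cons.mp hs with ⟨hy, hys⟩
    simp only [PySem.List.insertBy]
    split_ifs with h
    · replace h := of_decide_eq_true h
      refine List.pairwise_cons.mpr ⟨?_, hs⟩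
      intro z hz
      rcases List.mem_cons.mp hz with rfl | hz
      · omega
      · have := hy z hz; omega
    · replace h : ¬ PySem.Str.len y < PySem.Str.len x := by simpa using h
      refine List.pairwise_cons.mpr ⟨?_, ih hys⟩
      intro z hz
      rcases (PySem.List.mem_insertBy _ _ _ _).mp hz with rfl | hz
      · omega
      · exact hy z hz

-- the key step: A's scan after a stable insert into a length-descending list = B's accumulator update
theorem pvGoA_insertBy (titles : List String) (x : String) (s : List String)
    (hs : s.Pairwise (fun a b => PySem.Str.len b ≤ PySem.Str.len a)) :
    pvGoA titles (PySem.List.insertBy (fun a b => decide (PySem.Str.len b < PySem.Str.len a)) x s)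
      = pvStepB titles (pvGoA titles s) x := by
  induction s with
  | nil =>
    by_cases hl : PySem.Str.len "" < PySem.Str.len x
    · exact pvCons_step titles x [] (fun _ => hl)
    · have hx : x = "" := pvEmpty_of_len_le x (by
        have h0 : PySem.Str.len "" = 0 := rfl
        omega)
      subst hx
      simp only [PySem.List.insertBy, pvGoA, pvStepB]
      split_ifs <;> rfl
  | cons y ys ih =>
    rcases List.pairwise_cons.mp hs with ⟨hy, hys⟩
    simp only [PySem.List.insertBy]
    split_ifs with h
    · replace h := of_decide_eq_true h
      refine pvCons_step titles x (y :: ys) (fun _ => ?_)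
      rcases pvGoA_eq_empty_or_mem titles (y :: ys) with he | hm
      · rw [he]
        have := pvLen_nonneg y
        have h0 : PySem.Str.len "" = 0 := rfl
        omega
      · rcases List.mem_cons.mp hm with he | hm'
        · rw [he]; exact h
        · have := hy _ hm'; omega
    · replace h : ¬ PySem.Str.len y < PySem.Str.len x := by simpa using h
      by_cases hq : (titles.any fun t => PySem.Str.isIn y t) = true
      · simp only [pvGoA, pvStepB, if_pos hq]
        rw [if_neg (by rw [Bool.and_eq_true]; rintro ⟨hlx, -⟩; exact h (of_decide_eq_true hlx))]
      · simp only [pvGoA, if_neg hq]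
        exact ih hys

-- fold the insertion sort and B's fold in lockstep
theorem pvFold_lemma (titles : List String) (keys : List String) :
    ∀ acc, acc.Pairwise (fun a b => PySem.Str.len b ≤ PySem.Str.len a) →
      pvGoA titles (keys.foldl
          (fun acc x => PySem.List.insertBy
            (fun a b => decide (PySem.Str.len b < PySem.Str.len a)) x acc) acc)
        = keys.foldl (pvStepB titles) (pvGoA titles acc) := by
  induction keys with
  | nil => intro acc _; rfl
  | cons x ks ih =>
    intro acc hacc
    simp only [List.foldl_cons]
    rw [ih _ (pvInsert_pairwise x acc hacc), pvGoA_insertBy titles x acc hacc]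

-- ===== VERDICT (by name: the statement is the Claim_ definition above) =====
theorem infer_nationality_from_categories_spec : Claim_equal_infer_nationality_from_categories := by
  intro titles pairs _
  unfold Spec_infer_nationality_from_categories
  unfold infer_nationality_from_categories infer_nationality_from_categories_alt
  rw [PySem.List.sorted_rev_eq_foldl_insertBy]
  exact pvFold_lemma titles _ [] List.Pairwise.nil
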